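-- pv_equiv track=rewrite | github.com/ZaytsevNS/python_codewars | 7KYU/calc.py | calc
-- ===== SOURCE A (Python) =====
-- def calc(s: str) -> int:
--     total1 = ''
--     for i in s:
--         total1 += str(ord(i))
--     total2 = ''
--     for k in total1:
--         if k == str(7):
--             total2 += str(1)
--         else:
--             total2 += k
--     return sum([int(i) for i in total1]) - sum([int(i) for i in total2])
-- ===== SOURCE B (Python) =====
-- def calc(s: str) -> int:
--     digits = ''.join(str(ord(c)) for c in s)
--     return 6 * digits.count('7')
-- ===== Notes on version B (the rewrite author's own statement) =====
-- stated objective: simpler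
-- what changed: Instead of building the ord-digit string, building a second string with the digit seven replaced by one, and summing both digit lists to subtract, B builds the digit string once and returns six times the number of seven-digits in it, since each seven contributes exactly 6 to the difference and every other digit cancels.
import Mathlib
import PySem

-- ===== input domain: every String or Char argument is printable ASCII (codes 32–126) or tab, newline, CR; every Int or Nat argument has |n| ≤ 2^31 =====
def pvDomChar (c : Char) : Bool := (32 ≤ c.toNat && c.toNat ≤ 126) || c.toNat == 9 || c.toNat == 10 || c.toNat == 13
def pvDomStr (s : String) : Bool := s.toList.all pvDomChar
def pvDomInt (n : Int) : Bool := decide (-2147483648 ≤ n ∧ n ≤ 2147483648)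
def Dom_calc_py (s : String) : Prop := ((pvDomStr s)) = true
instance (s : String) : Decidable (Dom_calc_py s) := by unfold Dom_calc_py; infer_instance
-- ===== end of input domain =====

-- B collapses A's build-replace-two-sums-subtract into counting '7' digits once and multiplying by 6 (simpler, one pass).


-- ===== PORT A =====
-- int(i) for a single digit char i; exact here: every char of total1/total2 is a
-- decimal digit of str(ord(c)), on which Python's int() returns normally.
def pvDigitInt (c : Char) : Int := (PySem.Int.ofStr? (String.ofList [c])).getD 0

def calc_py (s : String) : Int :=
  let total1 := s.toList.foldl (fun acc i => acc ++ (PySem.Int.toStr (i.toNat : Int)).toList) []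
  let total2 := total1.foldl (fun acc k => if k == '7' then acc ++ ['1'] else acc ++ [k]) []
  (total1.map pvDigitInt).sum - (total2.map pvDigitInt).sum

-- ===== PORT B =====
def calc_py_alt (s : String) : Int :=
  let digits := String.ofList (s.toList.flatMap (fun c => (PySem.Int.toStr (c.toNat : Int)).toList))
  6 * (PySem.Str.count digits "7" : Int)

-- ===== PRECONDITION & SPEC =====
def Spec_calc_py (s : String) (out : Int) : Prop := out = calc_py_alt s
instance (s : String) (out : Int) : Decidable (Spec_calc_py s out) := by unfold Spec_calc_py; infer_instance

-- ===== CLAIM (what is proved, stated in full; the proofs are below) =====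
def Claim_equal_calc_py : Prop := ∀ (s : String), Dom_calc_py s → Spec_calc_py s (calc_py s)

-- ===== LEMMAS AND PROOFS =====

-- A's inner fold builds the map of the replacement function.
theorem pv_fold2_eq_map (l acc : List Char) :
    l.foldl (fun acc k => if k == '7' then acc ++ ['1'] else acc ++ [k]) acc
      = acc ++ l.map (fun k => if k == '7' then '1' else k) := by
  have : (fun (acc : List Char) k => if k == '7' then acc ++ ['1'] else acc ++ [k])
      = fun acc k => acc ++ [if k == '7' then '1' else k] := by
    funext a k; by_cases h : k == '7' <;> simp [h]
  rw [this, PySem.List.foldl_append_singleton_eq_map]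

-- per-digit cancellation: the two digit sums differ by 6 per '7'.
theorem pv_sum_diff (l : List Char) :
    (l.map pvDigitInt).sum - ((l.map (fun k => if k == '7' then '1' else k)).map pvDigitInt).sum
      = 6 * (l.count '7' : Int) := by
  induction l with
  | nil => simp
  | cons c t ih =>
    by_cases h : c = '7'
    · subst h
      simp only [List.map_cons, List.sum_cons, List.count_cons, beq_self_eq_true]
      have : pvDigitInt '7' - pvDigitInt '1' = 6 := by decide
      push_cast
      omega
    · have hb : (c == '7') = false := by simp [h]
      simp only [List.map_cons, List.sum_cons, List.count_cons, hb]
      push_cast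
      omega

-- Chars.count.go with a single-character needle counts occurrences.
theorem pv_go_count (fuel : Nat) (l : List Char) (acc : Nat) (h : l.length ≤ fuel) :
    PySem.Chars.count.go ['7'] fuel l acc = acc + l.count '7' := by
  induction fuel generalizing l acc with
  | zero =>
    have : l = [] := by cases l <;> simp_all
    subst this; simp [PySem.Chars.count.go]
  | succ n ih =>
    cases l with
    | nil => simp [PySem.Chars.count.go]
    | cons c t =>
      have ht : t.length ≤ n := by simpa using h
      by_cases hc : c = '7'
      · subst hc
        have hp : List.isPrefixOf ['7'] ('7' :: t) = true := by simp [List.isPrefixOf]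
        simp only [PySem.Chars.count.go, hp, if_pos]
        have hd : List.drop (['7'] : List Char).length ('7' :: t) = t := by simp
        rw [hd, ih t (acc + 1) ht]
        simp only [List.count_cons, beq_self_eq_true, if_true]
        omega
      · have hp : List.isPrefixOf ['7'] (c :: t) = false := by
          simp [List.isPrefixOf]
          exact fun hq => hc hq.symm
        simp only [PySem.Chars.count.go, hp, Bool.false_eq_true, if_false]
        rw [ih t acc ht]
        simp [hc]

theorem pv_count_single (l : List Char) :
    PySem.Chars.count l ['7'] = l.count '7' := by
  simp only [PySem.Chars.count, List.isEmpty_cons, Bool.false_eq_true, if_false]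
  simpa using pv_go_count l.length l 0 le_rfl

-- ===== VERDICT (by name: the statement is the Claim_ definition above) =====
theorem calc_py_spec : Claim_equal_calc_py := by
  intro s _
  unfold Spec_calc_py calc_py calc_py_alt
  simp only [PySem.List.foldl_append_eq_flatMap, List.nil_append, pv_fold2_eq_map,
    PySem.Str.count_eq]
  rw [pv_sum_diff]
  have : (String.ofList (s.toList.flatMap fun c => (PySem.Int.toStr (c.toNat : Int)).toList)).toList
      = s.toList.flatMap fun c => (PySem.Int.toStr (c.toNat : Int)).toList := by
    rw [String.toList_ofList]
  rw [this]
  have h7 : ("7" : String).toList = ['7'] := rfl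
  rw [h7, pv_count_single]
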